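-- pv_equiv track=rewrite | github.com/nccurry/papercrown | src/papercrown/assembly.py | _strip_trailing_related_section
-- ===== SOURCE A (Python) =====
-- def _strip_trailing_related_section(text: str) -> str:
--     """Remove a final `Related` backlink block from an inline source."""
--     lines = text.splitlines()
--     end = len(lines)
--     while end > 0 and lines[end - 1].strip() == "":
--         end -= 1
--     i = end - 1
--     while i >= 0:
--         stripped = lines[i].strip()
--         if stripped == "" or stripped.startswith("- ") or stripped.startswith("* "):
--             i -= 1
--             continue
--         break
--     if i < 0 or lines[i].strip().lower() != "**related**":
--         return text
--     j = i - 1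
--     while j >= 0 and lines[j].strip() == "":
--         j -= 1
--     if j < 0 or lines[j].strip() != "---":
--         return text
--     return "\n".join(lines[:j]).rstrip()
-- ===== SOURCE B (Python) =====
-- def _strip_trailing_related_section(text: str) -> str:
--     """Remove a final `Related` backlink block from an inline source."""
--     body = _match_related_block(list(reversed(text.splitlines())))
--     if body is None:
--         return text
--     return "\n".join(reversed(body)).rstrip()
--
--
-- def _match_related_block(rev):
--     """Consume a Related block from the reversed line list; return the
--     remaining (still reversed) body lines, or None if no block matches."""
--     while rev and _is_blank_or_bullet(rev[0]):
--         rev = rev[1:]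
--     if not rev or rev[0].strip().lower() != "**related**":
--         return None
--     rev = rev[1:]
--     while rev and rev[0].strip() == "":
--         rev = rev[1:]
--     if not rev or rev[0].strip() != "---":
--         return None
--     return rev[1:]
--
--
-- def _is_blank_or_bullet(line):
--     s = line.strip()
--     return s == "" or s.startswith("- ") or s.startswith("* ")
-- ===== Notes on version B (the rewrite author's own statement) =====
-- stated objective: alternative
-- what changed: Replaces A's three index-arithmetic backward while-loops plus list slicing with a single structural consumption of the reversed line list that merges the blank and bullet skip phases and returns an optional remaining body.
import Mathlib
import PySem

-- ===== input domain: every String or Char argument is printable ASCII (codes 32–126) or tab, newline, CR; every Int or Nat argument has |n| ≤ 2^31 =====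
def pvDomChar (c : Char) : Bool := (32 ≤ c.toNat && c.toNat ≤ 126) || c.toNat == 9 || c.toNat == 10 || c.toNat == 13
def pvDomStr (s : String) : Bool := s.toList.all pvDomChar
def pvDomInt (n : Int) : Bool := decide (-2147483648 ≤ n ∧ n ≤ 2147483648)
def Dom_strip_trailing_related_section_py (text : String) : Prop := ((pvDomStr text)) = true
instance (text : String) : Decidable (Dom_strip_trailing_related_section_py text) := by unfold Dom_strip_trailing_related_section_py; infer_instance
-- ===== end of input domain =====

-- ===== PORT A =====
-- Port of A: three backward index loops (end / i / j), each a structural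
-- countdown recursion on the Nat "index + 1"; lines[k] via List.getD (k always in range).
def pvAStrip (s : String) : String := PySem.Str.strip s

def pvABlank (s : String) : Bool := pvAStrip s == ""

def pvABullet (s : String) : Bool :=
  let st := pvAStrip s
  st == "" || PySem.Str.startswith st "- " || PySem.Str.startswith st "* "

-- while end > 0 and lines[end-1].strip() == "": end -= 1
def pvALoopBlank (lines : List String) : Nat → Nat
  | 0 => 0
  | e + 1 => if pvABlank (lines.getD e "") then pvALoopBlank lines e else e + 1

-- while i >= 0 and (blank or bullet): i -= 1   (argument/result is i + 1)
def pvALoopBB (lines : List String) : Nat → Nat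
  | 0 => 0
  | i + 1 => if pvABullet (lines.getD i "") then pvALoopBB lines i else i + 1

def strip_trailing_related_section_py (text : String) : String :=
  let lines := PySem.Str.splitlines text
  let e := pvALoopBlank lines lines.length
  let i1 := pvALoopBB lines e          -- i1 = i + 1
  if i1 = 0 then text
  else if PySem.Str.lower (pvAStrip (lines.getD (i1 - 1) "")) != "**related**" then text
  else
    let j1 := pvALoopBlank lines (i1 - 1)   -- j1 = j + 1, starting from j = i - 1
    if j1 = 0 then text
    else if pvAStrip (lines.getD (j1 - 1) "") != "---" then text
    else PySem.Str.rstrip (PySem.Str.join "\n" (lines.take (j1 - 1)))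

-- ===== PORT B =====
-- Port of B: one structural consumption of the reversed line list returning an
-- optional remaining body (blank/bullet skipping merged into a single phase).
def pvBBlankOrBullet (line : String) : Bool :=
  let s := PySem.Str.strip line
  s == "" || PySem.Str.startswith s "- " || PySem.Str.startswith s "* "

def pvBDropBB : List String → List String
  | [] => []
  | l :: rest => if pvBBlankOrBullet l then pvBDropBB rest else l :: rest

def pvBDropBlank : List String → List String
  | [] => []
  | l :: rest => if PySem.Str.strip l == "" then pvBDropBlank rest else l :: rest

def pvBMatch (rev : List String) : Option (List String) :=
  match pvBDropBB rev with
  | [] => none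
  | l :: rest =>
    if PySem.Str.lower (PySem.Str.strip l) != "**related**" then none
    else
      match pvBDropBlank rest with
      | [] => none
      | l2 :: rest2 =>
        if PySem.Str.strip l2 != "---" then none
        else some rest2

def strip_trailing_related_section_py_alt (text : String) : String :=
  match pvBMatch (PySem.Str.splitlines text).reverse with
  | none => text
  | some body => PySem.Str.rstrip (PySem.Str.join "\n" body.reverse)

-- ===== PRECONDITION & SPEC =====
def Spec_strip_trailing_related_section_py (text : String) (out : String) : Prop := out = strip_trailing_related_section_py_alt text
instance (text : String) (out : String) : Decidable (Spec_strip_trailing_related_section_py text out) := by unfold Spec_strip_trailing_related_section_py; infer_instance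

-- ===== CLAIM (what is proved, stated in full; the proofs are below) =====
def Claim_equal_strip_trailing_related_section_py : Prop := ∀ (text : String), Dom_strip_trailing_related_section_py text → Spec_strip_trailing_related_section_py text (strip_trailing_related_section_py text)

-- ===== LEMMAS AND PROOFS =====

-- A's blank predicate implies its blank-or-bullet predicate.
theorem pvABlank_imp (s : String) (h : pvABlank s = true) : pvABullet s = true := by
  simp [pvABlank] at h
  simp [pvABullet, h]

-- dropWhile composition: dropping with a weaker predicate first is absorbed.
theorem pvDropWhile_absorb {a : Type} (p q : a → Bool) (h : ∀ x, q x = true → p x = true) :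
    ∀ l : List a, (l.dropWhile q).dropWhile p = l.dropWhile p := by
  intro l
  induction l with
  | nil => rfl
  | cons x t ih =>
    by_cases hq : q x = true
    · simp [List.dropWhile_cons, hq, h x hq, ih]
    · simp [List.dropWhile_cons, hq]

-- B's skip functions are List.dropWhile with A's predicates (the predicates coincide).
theorem pvBDropBB_eq : ∀ l : List String, pvBDropBB l = l.dropWhile pvABullet := by
  intro l
  induction l with
  | nil => rfl
  | cons x t ih =>
    show (if pvBBlankOrBullet x then pvBDropBB t else x :: t) = _
    have hpred : pvBBlankOrBullet x = pvABullet x := rfl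
    rw [hpred, List.dropWhile_cons]
    by_cases hx : pvABullet x = true <;> simp [hx, ih]

theorem pvBDropBlank_eq : ∀ l : List String, pvBDropBlank l = l.dropWhile pvABlank := by
  intro l
  induction l with
  | nil => rfl
  | cons x t ih =>
    show (if PySem.Str.strip x == "" then pvBDropBlank t else x :: t) = _
    have hpred : (PySem.Str.strip x == "") = pvABlank x := rfl
    rw [hpred, List.dropWhile_cons]
    by_cases hx : pvABlank x = true <;> simp [hx, ih]

-- A's backward blank-skip loop computes dropWhile on the reversed prefix.
theorem pvALoopBlank_spec (L : List String) :
    ∀ k, k ≤ L.length →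
      pvALoopBlank L k = ((L.take k).reverse.dropWhile pvABlank).length ∧
      (L.take k).reverse.dropWhile pvABlank = (L.take (pvALoopBlank L k)).reverse := by
  intro k
  induction k with
  | zero => intro _; simp [pvALoopBlank]
  | succ e ih =>
    intro hk
    have he : e < L.length := hk
    have hget : L.getD e "" = L[e] := by
      simp [List.getD, List.getElem?_eq_getElem he]
    have htake : L.take (e + 1) = L.take e ++ [L[e]] := by
      rw [List.take_succ, List.getElem?_eq_getElem he]
      rfl
    have hrev : (L.take (e + 1)).reverse = L[e] :: (L.take e).reverse := by
      rw [htake]; simp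
    by_cases hb : pvABlank (L.getD e "") = true
    · have hloop : pvALoopBlank L (e + 1) = pvALoopBlank L e := by
        simp only [pvALoopBlank]
        rw [if_pos hb]
      have hdw : (L.take (e + 1)).reverse.dropWhile pvABlank
          = (L.take e).reverse.dropWhile pvABlank := by
        rw [hrev, List.dropWhile_cons]
        rw [hget] at hb
        simp [hb]
      obtain ⟨h1, h2⟩ := ih (Nat.le_of_lt he)
      exact ⟨by rw [hloop, hdw, h1], by rw [hdw, hloop]; exact h2⟩
    · have hloop : pvALoopBlank L (e + 1) = e + 1 := by
        simp only [pvALoopBlank]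
        rw [if_neg hb]
      have hdw : (L.take (e + 1)).reverse.dropWhile pvABlank = (L.take (e + 1)).reverse := by
        rw [hrev, List.dropWhile_cons]
        rw [hget] at hb
        simp [hb, ← hrev]
      refine ⟨?_, by rw [hdw, hloop]⟩
      rw [hloop, hdw]
      simp [Nat.min_eq_left (Nat.succ_le_of_lt he)]

-- A's backward blank-or-bullet loop, same statement.
theorem pvALoopBB_spec (L : List String) :
    ∀ k, k ≤ L.length →
      pvALoopBB L k = ((L.take k).reverse.dropWhile pvABullet).length ∧
      (L.take k).reverse.dropWhile pvABullet = (L.take (pvALoopBB L k)).reverse := by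
  intro k
  induction k with
  | zero => intro _; simp [pvALoopBB]
  | succ e ih =>
    intro hk
    have he : e < L.length := hk
    have hget : L.getD e "" = L[e] := by
      simp [List.getD, List.getElem?_eq_getElem he]
    have htake : L.take (e + 1) = L.take e ++ [L[e]] := by
      rw [List.take_succ, List.getElem?_eq_getElem he]
      rfl
    have hrev : (L.take (e + 1)).reverse = L[e] :: (L.take e).reverse := by
      rw [htake]; simp
    by_cases hb : pvABullet (L.getD e "") = true
    · have hloop : pvALoopBB L (e + 1) = pvALoopBB L e := by
        simp only [pvALoopBB]
        rw [if_pos hb]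
      have hdw : (L.take (e + 1)).reverse.dropWhile pvABullet
          = (L.take e).reverse.dropWhile pvABullet := by
        rw [hrev, List.dropWhile_cons]
        rw [hget] at hb
        simp [hb]
      obtain ⟨h1, h2⟩ := ih (Nat.le_of_lt he)
      exact ⟨by rw [hloop, hdw, h1], by rw [hdw, hloop]; exact h2⟩
    · have hloop : pvALoopBB L (e + 1) = e + 1 := by
        simp only [pvALoopBB]
        rw [if_neg hb]
      have hdw : (L.take (e + 1)).reverse.dropWhile pvABullet = (L.take (e + 1)).reverse := by
        rw [hrev, List.dropWhile_cons]
        rw [hget] at hb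
        simp [hb, ← hrev]
      refine ⟨?_, by rw [hdw, hloop]⟩
      rw [hloop, hdw]
      simp [Nat.min_eq_left (Nat.succ_le_of_lt he)]

-- If a prefix of L of length m+1 is pre ++ [x] then L[m] = x and L.take m = pre.
theorem pvTakeConcat (L pre : List String) (x : String) (m : Nat)
    (h : L.take (m + 1) = pre ++ [x]) (hlen : pre.length = m) :
    L.getD m "" = x ∧ L.take m = pre := by
  have htk : L.take m = pre := by
    have h2 : L.take m = (L.take (m + 1)).take m := by
      rw [List.take_take]
      simp
    rw [h2, h, ← hlen, List.take_left]
  refine ⟨?_, htk⟩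
  have hsucc : L.take (m + 1) = L.take m ++ L[m]?.toList := List.take_succ
  rw [h, htk] at hsucc
  cases hx : L[m]? with
  | none => rw [hx] at hsucc; simp at hsucc
  | some a =>
    rw [hx] at hsucc
    simp at hsucc
    simp [List.getD, hx, hsucc]

-- B's matcher, written as a match over the two dropWhile results.
theorem pvBMatch_eq (rev : List String) :
    pvBMatch rev =
      (match rev.dropWhile pvABullet with
       | [] => none
       | l :: rest =>
         if PySem.Str.lower (PySem.Str.strip l) != "**related**" then none
         else
           match rest.dropWhile pvABlank with
           | [] => none
           | l2 :: rest2 =>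
             if PySem.Str.strip l2 != "---" then none
             else some rest2) := by
  unfold pvBMatch
  rw [pvBDropBB_eq]
  cases rev.dropWhile pvABullet with
  | nil => rfl
  | cons l rest => simp [pvBDropBlank_eq]

-- The core equality between the two port bodies on an arbitrary line list.
theorem pvCoreEq (t : String) (L : List String) :
    (if pvALoopBB L (pvALoopBlank L L.length) = 0 then t
     else if PySem.Str.lower
         (pvAStrip (L.getD (pvALoopBB L (pvALoopBlank L L.length) - 1) "")) != "**related**" then t
     else if pvALoopBlank L (pvALoopBB L (pvALoopBlank L L.length) - 1) = 0 then t
     else if pvAStrip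
         (L.getD (pvALoopBlank L (pvALoopBB L (pvALoopBlank L L.length) - 1) - 1) "") != "---" then t
     else PySem.Str.rstrip (PySem.Str.join "
"
         (L.take (pvALoopBlank L (pvALoopBB L (pvALoopBlank L L.length) - 1) - 1)))) =
    (match pvBMatch L.reverse with
     | none => t
     | some body => PySem.Str.rstrip (PySem.Str.join "
" body.reverse)) := by
  obtain ⟨he1, he2⟩ := pvALoopBlank_spec L L.length (Nat.le_refl _)
  rw [List.take_length] at he2
  have hele : pvALoopBlank L L.length ≤ L.length := by
    rw [he1]
    calc ((L.take L.length).reverse.dropWhile pvABlank).length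
        ≤ (L.take L.length).reverse.length := List.length_dropWhile_le _ _
      _ ≤ L.length := by simp
  obtain ⟨hi1, hi2⟩ := pvALoopBB_spec L (pvALoopBlank L L.length) hele
  rw [← he2, pvDropWhile_absorb pvABullet pvABlank pvABlank_imp] at hi1 hi2
  rw [pvBMatch_eq]
  simp only [pvAStrip]
  cases hr2 : L.reverse.dropWhile pvABullet with
  | nil =>
    rw [hr2] at hi1
    simp at hi1
    rw [if_pos hi1]
  | cons l rest =>
    rw [hr2] at hi1 hi2
    have hi1' : pvALoopBB L (pvALoopBlank L L.length) = rest.length + 1 := by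
      simpa using hi1
    rw [hi1']
    rw [if_neg (by omega : ¬ (rest.length + 1 = 0))]
    simp only [Nat.add_sub_cancel]
    have htake : L.take (rest.length + 1) = rest.reverse ++ [l] := by
      have h' := congrArg List.reverse hi2
      rw [List.reverse_reverse] at h'
      rw [← hi1', ← h']
      simp
    obtain ⟨hget, htk⟩ := pvTakeConcat L rest.reverse l rest.length htake (by simp)
    rw [hget]
    by_cases hrel : (PySem.Str.lower (PySem.Str.strip l) != "**related**") = true
    · simp only [if_pos hrel]
    · simp only [if_neg hrel]
      have hrle : rest.length ≤ L.length := by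
        have hlen := congrArg List.length htake
        simp at hlen
        omega
      obtain ⟨hj1, hj2⟩ := pvALoopBlank_spec L rest.length hrle
      rw [htk] at hj1 hj2
      simp only [List.reverse_reverse] at hj1 hj2
      cases hr3 : rest.dropWhile pvABlank with
      | nil =>
        rw [hr3] at hj1
        simp at hj1
        rw [if_pos hj1]
      | cons l2 rest2 =>
        rw [hr3] at hj1 hj2
        have hj1' : pvALoopBlank L rest.length = rest2.length + 1 := by
          simpa using hj1
        rw [hj1']
        rw [if_neg (by omega : ¬ (rest2.length + 1 = 0))]
        simp only [Nat.add_sub_cancel]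
        have htake2 : L.take (rest2.length + 1) = rest2.reverse ++ [l2] := by
          have h' := congrArg List.reverse hj2
          rw [List.reverse_reverse] at h'
          rw [← hj1', ← h']
          simp
        obtain ⟨hget2, htk2⟩ := pvTakeConcat L rest2.reverse l2 rest2.length htake2 (by simp)
        rw [hget2]
        by_cases hsep : (PySem.Str.strip l2 != "---") = true
        · simp only [if_pos hsep]
        · simp only [if_neg hsep]
          rw [htk2]

-- ===== VERDICT (by name: the statement is the Claim_ definition above) =====
theorem strip_trailing_related_section_py_spec : Claim_equal_strip_trailing_related_section_py := by
  intro text _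
  show strip_trailing_related_section_py text = strip_trailing_related_section_py_alt text
  unfold strip_trailing_related_section_py strip_trailing_related_section_py_alt
  exact pvCoreEq text (PySem.Str.splitlines text)
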